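-- pv_equiv track=rewrite | github.com/prudhvirajn/quiet-feature-learning-in-algorithmic-tasks | code/utils.py | group_bitarrays
-- ===== SOURCE A (Python) =====
-- def group_bitarrays(data, task_length):
--     groups = {}
--     for bitarray in data:
--         x, y = tuple(bitarray[:task_length]), tuple(bitarray[task_length:])
--         key = tuple(sorted([x, y]))
--         if key not in groups:
--             groups[key] = []
--         groups[key].append(bitarray)
--
--     return groups
-- ===== SOURCE B (Python) =====
-- def group_bitarrays(data, task_length):
--     def key(b):
--         x, y = tuple(b[:task_length]), tuple(b[task_length:])
--         return (min(x, y), max(x, y))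
--
--     keys = [key(b) for b in data]
--     out = {}
--     for b, k in zip(data, keys):
--         if k not in out:
--             out[k] = [c for c, kc in zip(data, keys) if kc == k]
--     return out
-- ===== Notes on version B (the rewrite author's own statement) =====
-- stated objective: alternative
-- what changed: Replaces A's single-pass dict bucketing (setdefault-then-append per element) with a two-pass decomposition: precompute all keys once, then at each key's first occurrence build its entire group with one filter over the data, and compute the key via min/max instead of sorted.
import Mathlib
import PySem

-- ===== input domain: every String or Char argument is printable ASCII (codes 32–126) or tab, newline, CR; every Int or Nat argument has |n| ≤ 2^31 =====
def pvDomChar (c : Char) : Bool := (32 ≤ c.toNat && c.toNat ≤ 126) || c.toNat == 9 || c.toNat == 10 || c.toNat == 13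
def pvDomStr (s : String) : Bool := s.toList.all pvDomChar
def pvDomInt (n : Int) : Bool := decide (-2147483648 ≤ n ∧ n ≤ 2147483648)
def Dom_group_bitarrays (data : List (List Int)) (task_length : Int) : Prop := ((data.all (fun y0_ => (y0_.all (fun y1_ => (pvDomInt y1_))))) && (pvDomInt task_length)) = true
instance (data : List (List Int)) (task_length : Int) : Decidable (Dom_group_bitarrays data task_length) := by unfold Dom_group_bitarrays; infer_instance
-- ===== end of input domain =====

-- B replaces A's single-pass hash-bucketing (setdefault-then-append) by a two-pass
-- decomposition: precompute all keys, then at each key's first occurrence build its whole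
-- group with one filter over the data; objective: alternative (same results, different shape).

-- ===== PORT A =====
-- key of A: tuple(sorted([bitarray[:task_length], bitarray[task_length:]])); Python tuple
-- comparison is lexicographic = Lean's List Int order; sorted ported via PySem.List.sorted.
def pvKeyA (task_length : Int) (b : List Int) : List Int × List Int :=
  let x := PySem.List.slice b none (some task_length)
  let y := PySem.List.slice b (some task_length) none
  match PySem.List.sorted [x, y] (fun v => v) false with
  | [a, c] => (a, c)
  | _ => (x, y)   -- unreachable: sorted of a two-element list has two elements

def group_bitarrays (data : List (List Int)) (task_length : Int) :
    List (List Int × List Int × List (List Int)) :=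
  (data.foldl (fun g b =>
      let key := pvKeyA task_length b
      let g := if g.contains key then g else g.insert key ([] : List (List Int))
      g.modify key [] (fun v => v ++ [b]))
    PySem.Dict.empty).items.map (fun p => (p.1.1, p.1.2, p.2))

-- ===== PORT B =====
-- key of B: (min(x, y), max(x, y)) on the two slices (Python min/max return the first
-- argument on ties, so this is the conditional swap below).
def pvKeyB (task_length : Int) (b : List Int) : List Int × List Int :=
  let x := PySem.List.slice b none (some task_length)
  let y := PySem.List.slice b (some task_length) none
  (if y < x then y else x, if x < y then y else x)

def group_bitarrays_alt (data : List (List Int)) (task_length : Int) :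
    List (List Int × List Int × List (List Int)) :=
  let ks := data.map (pvKeyB task_length)
  let pairs := data.zip ks
  (pairs.foldl (fun out p =>
      if out.contains p.2 then out
      else out.insert p.2 ((pairs.filter (fun q => q.2 == p.2)).map (fun q => q.1)))
    PySem.Dict.empty).items.map (fun p => (p.1.1, p.1.2, p.2))

-- ===== PRECONDITION & SPEC =====
def Spec_group_bitarrays (data : List (List Int)) (task_length : Int) (out : List (List Int × List Int × List (List Int))) : Prop := out = group_bitarrays_alt data task_length
instance (data : List (List Int)) (task_length : Int) (out : List (List Int × List Int × List (List Int))) : Decidable (Spec_group_bitarrays data task_length out) := by unfold Spec_group_bitarrays; infer_instance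

-- ===== CLAIM (what is proved, stated in full; the proofs are below) =====
def Claim_equal_group_bitarrays : Prop := ∀ (data : List (List Int)) (task_length : Int), Dom_group_bitarrays data task_length → Spec_group_bitarrays data task_length (group_bitarrays data task_length)

-- ===== LEMMAS AND PROOFS =====

-- sorted of a two-element list is a conditional swap
theorem sorted_pair (x y : List Int) :
    PySem.List.sorted [x, y] (fun v => v) false = if y < x then [y, x] else [x, y] := by
  simp [PySem.List.sorted, PySem.List.insertBy]

-- A's and B's key functions agree
theorem key_eq (t : Int) (b : List Int) : pvKeyA t b = pvKeyB t b := by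
  unfold pvKeyA pvKeyB
  dsimp only
  rw [sorted_pair]
  by_cases h1 : PySem.List.slice b (some t) none < PySem.List.slice b none (some t)
  · have h2 : ¬ PySem.List.slice b none (some t) < PySem.List.slice b (some t) none := asymm h1
    simp [h1, h2]
  · by_cases h2 : PySem.List.slice b none (some t) < PySem.List.slice b (some t) none
    · simp [h1, h2]
    · have he : PySem.List.slice b none (some t) = PySem.List.slice b (some t) none :=
        le_antisymm (not_lt.mp h1) (not_lt.mp h2)
      simp [he]

-- A's loop body: setdefault-to-[] then append equals a single modify
theorem stepA_eq (g : PySem.Dict (List Int × List Int) (List (List Int)))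
    (k : List Int × List Int) (b : List Int) :
    (if g.contains k then g else g.insert k ([] : List (List Int))).modify k [] (fun v => v ++ [b])
      = g.modify k [] (fun v => v ++ [b]) := by
  by_cases h : g.contains k
  · simp [h]
  · have hf : g.contains k = false := by simpa using h
    simp only [hf, Bool.false_eq_true, if_false]
    show (g.insert k []).insert k ((g.insert k []).getD k [] ++ [b]) = g.insert k (g.getD k [] ++ [b])
    rw [PySem.Dict.getD_insert_self, PySem.Dict.insert_insert_self,
        PySem.Dict.getD_of_not_contains g [] hf]

-- zipping a list with its mapped keys is mapping to pairs
theorem zip_self_map {α β : Type} (l : List α) (f : α → β) :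
    l.zip (l.map f) = l.map (fun x => (x, f x)) := by
  induction l with
  | nil => rfl
  | cons a t ih => simp [ih]

-- B's loop: keys are the ordered dedup of all encountered keys
theorem keysB {α : Type} (V : (List Int × List Int) → List (List Int))
    (l : List (α × (List Int × List Int)))
    (d : PySem.Dict (List Int × List Int) (List (List Int))) :
    (l.foldl (fun out p => if out.contains p.2 then out else out.insert p.2 (V p.2)) d).keys
      = PySem.Set.update d.keys (l.map (·.2)) := by
  induction l generalizing d with
  | nil => rfl
  | cons p t ih =>
    simp only [List.foldl_cons, List.map_cons]
    rw [ih]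
    show _ = PySem.Set.update (PySem.Set.add d.keys p.2) (t.map (·.2))
    by_cases h : d.contains p.2
    · have hm : p.2 ∈ d.keys := (PySem.Dict.contains_iff_mem_keys d p.2).mp h
      simp [h, PySem.Set.add, hm]
    · have hf : d.contains p.2 = false := by simpa using h
      have hm : p.2 ∉ d.keys := fun hc => h ((PySem.Dict.contains_iff_mem_keys d p.2).mpr hc)
      simp only [hf, Bool.false_eq_true, if_false]
      rw [PySem.Dict.keys_insert_of_not_contains d (V p.2) hf]
      simp [PySem.Set.add, hm]

-- B's loop: value at a key — first-occurrence insert of the key-determined group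
theorem getDB {α : Type} (V : (List Int × List Int) → List (List Int))
    (l : List (α × (List Int × List Int)))
    (d : PySem.Dict (List Int × List Int) (List (List Int))) (k : List Int × List Int) :
    (l.foldl (fun out p => if out.contains p.2 then out else out.insert p.2 (V p.2)) d).getD k []
      = if d.contains k then d.getD k []
        else if k ∈ l.map (·.2) then V k else [] := by
  induction l generalizing d with
  | nil =>
    by_cases h : d.contains k
    · simp [h]
    · have hf : d.contains k = false := by simpa using h
      simp [hf, PySem.Dict.getD_of_not_contains d [] hf]
  | cons p t ih =>
    simp only [List.foldl_cons, List.map_cons, List.mem_cons]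
    rw [ih]
    by_cases h : d.contains p.2
    · by_cases hk : d.contains k
      · simp [h, hk]
      · have hne : k ≠ p.2 := fun he => hk (he ▸ h)
        by_cases hm : k ∈ t.map (·.2) <;> simp [h, hk, hne, hm]
    · have hf : d.contains p.2 = false := by simpa using h
      simp only [hf, Bool.false_eq_true, if_false]
      by_cases hk : k = p.2
      · subst hk
        simp [hf, PySem.Dict.contains_insert_self, PySem.Dict.getD_insert_self]
      · have hc : (d.insert p.2 (V p.2)).contains k = d.contains k := by
          rw [PySem.Dict.contains_insert]
          simp [show (k == p.2) = false from beq_eq_false_iff_ne.mpr hk]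
        by_cases hdk : d.contains k
        · simp [hc, hdk, PySem.Dict.getD_insert_of_ne d (V p.2) [] hk]
        · by_cases hm : k ∈ t.map (·.2) <;> simp [hc, hdk, hk, hm]

-- the filtered map-to-pairs in B is a plain filter of the data
theorem filter_pairs_eq (data : List (List Int)) (K : List Int → List Int × List Int)
    (k : List Int × List Int) :
    (((data.map (fun x => (x, K x))).filter (fun q => q.2 == k)).map (fun q => q.1))
      = data.filter (fun b => K b == k) := by
  induction data with
  | nil => rfl
  | cons a t ih =>
    by_cases h : K a == k
    · simp only [List.map_cons, List.filter_cons]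
      simp [h, ih]
    · have hf : (K a == k) = false := by simpa using h
      simp only [List.map_cons, List.filter_cons]
      simp [hf, ih]

-- A's dict, rewritten as a modify-loop over (key, element) pairs
theorem dictA_eq (data : List (List Int)) (t : Int) :
    data.foldl (fun g b =>
        let key := pvKeyA t b
        let g := if g.contains key then g else g.insert key ([] : List (List Int))
        g.modify key [] (fun v => v ++ [b])) PySem.Dict.empty
      = (data.map (fun b => (pvKeyB t b, b))).foldl
          (fun d p => d.modify p.1 [] (fun v => v ++ [p.2])) PySem.Dict.empty := by
  rw [List.foldl_map]
  apply PySem.List.foldl_congr_mem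
  intro d b _
  dsimp only
  rw [key_eq]
  exact stepA_eq d (pvKeyB t b) b

-- ===== VERDICT (by name: the statement is the Claim_ definition above) =====
theorem group_bitarrays_spec : Claim_equal_group_bitarrays := by
  intro data t _
  unfold Spec_group_bitarrays group_bitarrays group_bitarrays_alt
  dsimp only
  rw [dictA_eq, zip_self_map data (pvKeyB t)]
  set K := pvKeyB t with hK
  set pairs := data.map (fun b => (K b, b)) with hpairs
  set dA := pairs.foldl (fun d p => d.modify p.1 [] (fun v => v ++ [p.2])) PySem.Dict.empty with hdA
  set V : (List Int × List Int) → List (List Int) :=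
    fun k => (((data.map (fun x => (x, K x))).filter (fun q => q.2 == k)).map (fun q => q.1)) with hV
  set dB := (data.map (fun x => (x, K x))).foldl
      (fun out p => if out.contains p.2 then out else out.insert p.2 (V p.2))
      PySem.Dict.empty with hdB
  suffices hd : dA = dB by rw [hd]
  have hkA : dA.keys = PySem.Set.ofList (data.map K) := by
    rw [hdA, hpairs, List.foldl_map]
    rw [PySem.Dict.keys_foldl_modify_key data (fun b => K b) [] (fun _ b => (fun v => v ++ [b]))]
    rfl
  have hkB : dB.keys = PySem.Set.ofList (data.map K) := by
    rw [hdB, keysB]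
    have h2 : (data.map (fun x => (x, K x))).map (·.2) = data.map K := by simp
    rw [h2]; rfl
  have hndA : dA.keys.Nodup := by rw [hkA]; exact PySem.Set.nodup_ofList _
  have hndB : dB.keys.Nodup := by rw [hkB]; exact PySem.Set.nodup_ofList _
  have hval : ∀ k ∈ PySem.Set.ofList (data.map K), dA.getD k [] = dB.getD k [] := by
    intro k hk
    have hkmem : k ∈ data.map K := (PySem.Set.mem_ofList _ _).mp hk
    have hA : dA.getD k [] = data.filter (fun b => K b == k) := by
      rw [hdA, hpairs, PySem.Dict.getD_foldl_modify_append]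
      rw [PySem.Dict.getD_empty, List.nil_append, List.filter_map]
      simp [Function.comp_def]
    have hB : dB.getD k [] = data.filter (fun b => K b == k) := by
      rw [hdB, getDB]
      have hm2 : k ∈ (data.map (fun x => (x, K x))).map (·.2) := by simpa using hkmem
      rw [if_neg (by simp), if_pos hm2, hV]
      exact filter_pairs_eq data K k
    rw [hA, hB]
  apply PySem.Dict.ext
  rw [PySem.Dict.items_eq_map_keys dA hndA [], PySem.Dict.items_eq_map_keys dB hndB [],
      hkA, hkB]
  apply List.map_congr_left
  intro k hk
  rw [hval k hk]
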